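-- pv_equiv track=rewrite | github.com/Sameta-cani/CTP | 프로그래머스/2/17683. ［3차］ 방금그곡/［3차］ 방금그곡.py | solution
-- ===== SOURCE A (Python) =====
-- def solution(m: str, musicinfos: list) -> str:
--     def replace_sharps(melody: str) -> str:
--         replace_dict = {'C#': 'Z', 'D#': 'Y', 'F#': 'X', 'G#': 'W', 'A#': 'V', 'B#': 'U'}
--         for k, v in replace_dict.items():
--             melody = melody.replace(k, v)
--         return melody
--
--     m = replace_sharps(m)
--
--     candidates = []
--
--     for idx, info in enumerate(musicinfos):
--         start, end, title, sheet = info.split(',')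
--         start_h, start_m = map(int, start.split(':'))
--         end_h, end_m = map(int, end.split(':'))
--         play_time = (end_h * 60 + end_m) - (start_h * 60 + start_m)
--
--         sheet = replace_sharps(sheet)
--
--         if play_time <= len(sheet):
--             full_sheet = sheet[:play_time]
--         else:
--             full_sheet = (sheet * (play_time // len(sheet))) + sheet[:play_time % len(sheet)]
--
--         if m in full_sheet:
--             candidates.append((play_time, -idx, title))
--
--     if not candidates:
--         return '(None)'
--
--     candidates.sort(reverse=True)
--     return candidates[0][2]
-- ===== SOURCE B (Python) =====
-- def solution(m: str, musicinfos: list) -> str: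
--     def replace_sharps(melody: str) -> str:
--         replace_dict = {'C#': 'Z', 'D#': 'Y', 'F#': 'X', 'G#': 'W', 'A#': 'V', 'B#': 'U'}
--         for k, v in replace_dict.items():
--             melody = melody.replace(k, v)
--         return melody
--
--     def minutes(t: str) -> int:
--         h, mm = map(int, t.split(':'))
--         return 60 * h + mm
--
--     def played_part(info: str):
--         # one record -> (title, play_time, the part of the sheet actually played)
--         start, end, title, sheet = info.split(',')
--         play_time = minutes(end) - minutes(start)
--         sheet = replace_sharps(sheet)
--         if play_time <= len(sheet):
--             full = sheet[:play_time]
--         else: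
--             full = sheet * (play_time // len(sheet)) + sheet[:play_time % len(sheet)]
--         return title, play_time, full
--
--     melody = replace_sharps(m)
--     best = None
--     for info in musicinfos:
--         title, play_time, full = played_part(info)
--         if melody in full and (best is None or play_time > best[0]):
--             best = (play_time, title)
--     return best[1] if best is not None else '(None)'
-- ===== Notes on version B (the rewrite author's own statement) =====
-- stated objective: simpler
-- what changed: B drops A's candidate list and final reverse tuple-sort, keeping a single running best (strict > preserves A's earliest-index tie-break) and factoring parsing into minutes/played_part helpers.
import Mathlib
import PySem

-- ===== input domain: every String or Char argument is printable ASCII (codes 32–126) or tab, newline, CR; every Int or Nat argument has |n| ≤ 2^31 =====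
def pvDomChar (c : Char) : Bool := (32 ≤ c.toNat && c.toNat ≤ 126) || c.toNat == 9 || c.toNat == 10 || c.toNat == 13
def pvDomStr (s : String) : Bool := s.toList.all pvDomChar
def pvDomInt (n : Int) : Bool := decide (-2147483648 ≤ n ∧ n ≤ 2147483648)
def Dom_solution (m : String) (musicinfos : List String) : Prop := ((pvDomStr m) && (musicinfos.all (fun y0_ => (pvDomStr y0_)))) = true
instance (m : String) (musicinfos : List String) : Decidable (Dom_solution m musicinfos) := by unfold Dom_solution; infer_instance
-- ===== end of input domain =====

-- B replaces A's candidate list + reverse sort by a single-pass running best (strict '>' keeps A's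
-- earliest-index tie-break); objective: simpler.

-- ===== PORT A =====

-- replace_sharps: fold over the dict items in insertion order
def pvReplaceSharpsA (melody : String) : String :=
  [("C#", "Z"), ("D#", "Y"), ("F#", "X"), ("G#", "W"), ("A#", "V"), ("B#", "U")].foldl
    (fun mel kv => PySem.Str.replace mel kv.1 kv.2) melody

-- Python's '<' on (int, int, str) tuples, exact (String '<' is Python's str '<' per PySem)
def pvTupLt (x y : Int × Int × String) : Bool :=
  decide (x.1 < y.1) ||
    (decide (x.1 = y.1) &&
      (decide (x.2.1 < y.2.1) || (decide (x.2.1 = y.2.1) && decide (x.2.2 < y.2.2))))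

-- candidates.sort(reverse=True): the same stable insertion-sort shape PySem.List.sorted uses,
-- with Python's full tuple comparison (hand port; exact because insertBy keeps equals stable)
def pvSortRev (xs : List (Int × Int × String)) : List (Int × Int × String) :=
  xs.foldl (fun acc x => PySem.List.insertBy (fun a b => pvTupLt b a) x acc) []

def solution (m : String) (musicinfos : List String) : String :=
  let mr := pvReplaceSharpsA m
  let candidates : List (Int × Int × String) :=
    (PySem.List.enumerate musicinfos).foldl (fun cands p =>
      match PySem.Str.split? p.2 "," with
      | some [start, end_, title, sheet] =>
        match PySem.Str.split? start ":", PySem.Str.split? end_ ":" with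
        | some [sh, sm], some [eh, em] =>
          match PySem.Int.ofStr? sh, PySem.Int.ofStr? sm,
                PySem.Int.ofStr? eh, PySem.Int.ofStr? em with
          | some a, some b, some c, some d =>
            let playTime : Int := (c * 60 + d) - (a * 60 + b)
            let sheet2 := pvReplaceSharpsA sheet
            let fullSheet : String :=
              if playTime ≤ PySem.Str.len sheet2 then
                PySem.Str.slice sheet2 none (some playTime)
              else
                String.ofList (PySem.List.pyRepeat sheet2.toList
                    (PySem.Int.floordiv playTime (PySem.Str.len sheet2))) ++
                  PySem.Str.slice sheet2 none (some (PySem.Int.mod playTime (PySem.Str.len sheet2)))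
            if PySem.Str.isIn mr fullSheet then cands ++ [(playTime, -p.1, title)] else cands
          | _, _, _, _ => cands   -- Python raises ValueError here; outside Pre_
        | _, _ => cands           -- Python raises ValueError here; outside Pre_
      | _ => cands                -- Python raises ValueError here; outside Pre_
      ) []
  if candidates.isEmpty then "(None)"
  else ((pvSortRev candidates).headD (0, 0, "")).2.2

-- ===== PORT B =====

-- replace_sharps of B's Python (textually the same helper; each port carries its own copy)
def pvReplaceSharpsB (melody : String) : String :=
  [("C#", "Z"), ("D#", "Y"), ("F#", "X"), ("G#", "W"), ("A#", "V"), ("B#", "U")].foldl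
    (fun mel kv => PySem.Str.replace mel kv.1 kv.2) melody

-- minutes helper of B: 'h:m' -> total minutes (None where Python's int()/unpacking raises)
def pvMinutes (t : String) : Option Int :=
  match (PySem.Str.split? t ":").getD [] with
  | [h, mm] => (PySem.Int.ofStr? h).bind fun a => (PySem.Int.ofStr? mm).map fun b => 60 * a + b
  | [] => none
  | [_] => none
  | _ :: _ :: _ :: _ => none

-- played_part helper of B: (title, play_time, part of the sheet actually played)
-- split? with a nonempty separator is never none, so getD [] is exact
def pvPlayedPart (info : String) : String × Int × String :=
  match (PySem.Str.split? info ",").getD [] with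
  | [start, end_, title, sheet] =>
    match pvMinutes start with
    | some s =>
      match pvMinutes end_ with
      | some e =>
        let playTime : Int := e - s
        let sheet2 := pvReplaceSharpsB sheet
        let full : String :=
          if playTime ≤ PySem.Str.len sheet2 then
            PySem.Str.slice sheet2 none (some playTime)
          else
            String.ofList (PySem.List.pyRepeat sheet2.toList
                (PySem.Int.floordiv playTime (PySem.Str.len sheet2))) ++
              PySem.Str.slice sheet2 none (some (PySem.Int.mod playTime (PySem.Str.len sheet2)))
        (title, playTime, full)
      | none => ("", 0, "")   -- Python raises ValueError here; outside Pre_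
    | none => ("", 0, "")     -- Python raises ValueError here; outside Pre_
  | [] => ("", 0, "")
  | [_] => ("", 0, "")
  | [_, _] => ("", 0, "")
  | [_, _, _] => ("", 0, "")
  | _ :: _ :: _ :: _ :: _ :: _ => ("", 0, "")   -- wrong field count: Python raises; outside Pre_

def solution_alt (m : String) (musicinfos : List String) : String :=
  let melody := pvReplaceSharpsB m
  let best : Option (Int × String) :=
    musicinfos.foldl (fun best info =>
      let tpf := pvPlayedPart info
      if PySem.Str.isIn melody tpf.2.2 &&
          (match best with
           | none => true
           | some b => decide (b.1 < tpf.2.1)) then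
        some (tpf.2.1, tpf.1)
      else best) none
  match best with
  | some b => b.2
  | none => "(None)"

-- ===== PRECONDITION & SPEC =====

-- one record is well-formed: 4 comma fields, both times 'h:m' with int-parsable parts, and the
-- division by len(sheet) is not by zero (sheet nonempty, or a nonpositive play time)
def pvRecOK (info : String) : Bool :=
  match (PySem.Str.split? info ",").getD [] with
  | [start, end_, _, sheet] =>
    match (PySem.Str.split? start ":").getD [] with
    | [sh, sm] =>
      match (PySem.Str.split? end_ ":").getD [] with
      | [eh, em] =>
        (PySem.Int.ofStr? sh).isSome && (PySem.Int.ofStr? sm).isSome &&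
        (PySem.Int.ofStr? eh).isSome && (PySem.Int.ofStr? em).isSome &&
        (decide (sheet ≠ "") ||
          decide (((PySem.Int.ofStr? eh).getD 0 * 60 + (PySem.Int.ofStr? em).getD 0)
              - ((PySem.Int.ofStr? sh).getD 0 * 60 + (PySem.Int.ofStr? sm).getD 0) ≤ 0))
      | [] => false
      | [_] => false
      | _ :: _ :: _ :: _ => false
    | [] => false
    | [_] => false
    | _ :: _ :: _ :: _ => false
  | [] => false
  | [_] => false
  | [_, _] => false
  | [_, _, _] => false
  | _ :: _ :: _ :: _ :: _ :: _ => false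

-- Pre_ excludes exactly the records on which the Python raises (ValueError on unpacking/int(), or
-- ZeroDivisionError on an empty sheet with a positive play time); A returns on everything admitted.
def Pre_solution (m : String) (musicinfos : List String) : Prop :=
  ∀ info ∈ musicinfos, pvRecOK info = true

instance (m : String) (musicinfos : List String) : Decidable (Pre_solution m musicinfos) := by
  unfold Pre_solution; infer_instance

def pvWitness_solution : String × List String :=
  ("ABC", ["12:00,12:14,HELLO,ABCDEF", "13:00,13:05,WORLD,BCA"])

def Spec_solution (m : String) (musicinfos : List String) (out : String) : Prop :=
  out = solution_alt m musicinfos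
instance (m : String) (musicinfos : List String) (out : String) :
    Decidable (Spec_solution m musicinfos out) := by unfold Spec_solution; infer_instance

-- ===== CLAIM (what is proved, stated in full; the proofs are below) =====
def Claim_equal_solution : Prop := ∀ (m : String) (musicinfos : List String),
  Dom_solution m musicinfos → Pre_solution m musicinfos →
    Spec_solution m musicinfos (solution m musicinfos)

-- ===== LEMMAS AND PROOFS =====

-- semantic value of one well-formed record: `some (play_time, title)` when the melody occurs
def pvRec (mel : String) (info : String) : Option (Int × String) :=
  let tpf := pvPlayedPart info
  if pvRecOK info && PySem.Str.isIn mel tpf.2.2 then some (tpf.2.1, tpf.1) else none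

-- the candidate triples A collects, starting at enumerate index idx
def pvMatched (mel : String) (idx : Int) : List String → List (Int × Int × String)
  | [] => []
  | info :: rest =>
    match pvRec mel info with
    | some (t, title) => (t, -idx, title) :: pvMatched mel (idx + 1) rest
    | none => pvMatched mel (idx + 1) rest

-- B's running best, replayed over the collected triples
def pvBestT (best : Option (Int × String)) (cs : List (Int × Int × String)) :
    Option (Int × String) :=
  cs.foldl (fun best c =>
    match best with
    | none => some (c.1, c.2.2)
    | some b => if b.1 < c.1 then some (c.1, c.2.2) else best) best

-- B's running best over (play_time, title) pairs
def pvBestP (best : Option (Int × String)) (ps : List (Int × String)) :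
    Option (Int × String) :=
  ps.foldl (fun best p =>
    match best with
    | none => some p
    | some b => if b.1 < p.1 then some p else best) best

-- the order that governs A's sort on its candidates: lexicographic (play_time, -idx)
def pvKey (c : Int × Int × String) : Lex (Int × Int) := toLex (c.1, c.2.1)

-- A's fold body / B's fold body as named functions (definitionally the lambdas of the ports)
def pvStepA (mel : String) (cands : List (Int × Int × String)) (p : Int × String) :
    List (Int × Int × String) :=
  match PySem.Str.split? p.2 "," with
  | some [start, end_, title, sheet] =>
    match PySem.Str.split? start ":", PySem.Str.split? end_ ":" with
    | some [sh, sm], some [eh, em] =>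
      match PySem.Int.ofStr? sh, PySem.Int.ofStr? sm,
            PySem.Int.ofStr? eh, PySem.Int.ofStr? em with
      | some a, some b, some c, some d =>
        let playTime : Int := (c * 60 + d) - (a * 60 + b)
        let sheet2 := pvReplaceSharpsA sheet
        let fullSheet : String :=
          if playTime ≤ PySem.Str.len sheet2 then
            PySem.Str.slice sheet2 none (some playTime)
          else
            String.ofList (PySem.List.pyRepeat sheet2.toList
                (PySem.Int.floordiv playTime (PySem.Str.len sheet2))) ++
              PySem.Str.slice sheet2 none (some (PySem.Int.mod playTime (PySem.Str.len sheet2)))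
        if PySem.Str.isIn mel fullSheet then cands ++ [(playTime, -p.1, title)] else cands
      | _, _, _, _ => cands
    | _, _ => cands
  | _ => cands

def pvStepB (mel : String) (best : Option (Int × String)) (info : String) :
    Option (Int × String) :=
  let tpf := pvPlayedPart info
  if PySem.Str.isIn mel tpf.2.2 &&
      (match best with
       | none => true
       | some b => decide (b.1 < tpf.2.1)) then
    some (tpf.2.1, tpf.1)
  else best

lemma solution_unfold (m : String) (infos : List String) :
    solution m infos =
      (if ((PySem.List.enumerate infos).foldl (pvStepA (pvReplaceSharpsA m)) []).isEmpty
       then "(None)"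
       else ((pvSortRev ((PySem.List.enumerate infos).foldl (pvStepA (pvReplaceSharpsA m)) [])).headD
           (0, 0, "")).2.2) := rfl

lemma solution_alt_unfold (m : String) (infos : List String) :
    solution_alt m infos =
      (match infos.foldl (pvStepB (pvReplaceSharpsB m)) none with
       | some b => b.2
       | none => "(None)") := rfl

lemma repl_AB (s : String) : pvReplaceSharpsA s = pvReplaceSharpsB s := rfl

-- A's fold body, rewritten through pvRec (on a well-formed record)
lemma stepA_rec (mel : String) (cands : List (Int × Int × String)) (idx : Int) (info : String)
    (h : pvRecOK info = true) :
    pvStepA mel cands (idx, info) =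
      match pvRec mel info with
      | some (t, title) => cands ++ [(t, -idx, title)]
      | none => cands := by
  have hOK := h
  unfold pvRecOK at h
  unfold pvStepA pvRec pvPlayedPart
  cases h1 : PySem.Str.split? info "," with
  | none => rw [h1] at h; simp at h
  | some parts =>
    rw [h1] at h
    match parts with
    | [start, end_, title, sheet] =>
      simp only [Option.getD_some] at h ⊢
      cases h2 : PySem.Str.split? start ":" with
      | none => rw [h2] at h; simp at h
      | some ps =>
        rw [h2] at h
        match ps with
        | [sh, sm] =>
          simp only [Option.getD_some] at h ⊢
          cases h3 : PySem.Str.split? end_ ":" with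
          | none => rw [h3] at h; simp at h
          | some pe =>
            rw [h3] at h
            match pe with
            | [eh, em] =>
              simp only [Option.getD_some] at h ⊢
              cases h4 : PySem.Int.ofStr? sh with
              | none => rw [h4] at h; simp at h
              | some a =>
                rw [h4] at h
                cases h5 : PySem.Int.ofStr? sm with
                | none => rw [h5] at h; simp at h
                | some b =>
                  rw [h5] at h
                  cases h6 : PySem.Int.ofStr? eh with
                  | none => rw [h6] at h; simp at h
                  | some c =>
                    rw [h6] at h
                    cases h7 : PySem.Int.ofStr? em with
                    | none => rw [h7] at h; simp at h
                    | some d =>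
                      rw [h7] at h
                      simp only [pvMinutes, h2, h3, h4, h5, h6, h7, Option.getD_some,
                        Option.bind_some, Option.map_some] at h ⊢
                      have hpt : (60 * c + d) - (60 * a + b) = (c * 60 + d) - (a * 60 + b) := by
                        ring
                      rw [hpt, hOK]
                      simp only [Bool.true_and, ← repl_AB]
                      cases hin : PySem.Str.isIn mel
                          (if (c * 60 + d) - (a * 60 + b) ≤ PySem.Str.len (pvReplaceSharpsA sheet) then
                            PySem.Str.slice (pvReplaceSharpsA sheet) none (some ((c * 60 + d) - (a * 60 + b)))
                          else
                            String.ofList (PySem.List.pyRepeat (pvReplaceSharpsA sheet).toList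
                                (PySem.Int.floordiv ((c * 60 + d) - (a * 60 + b)) (PySem.Str.len (pvReplaceSharpsA sheet)))) ++
                              PySem.Str.slice (pvReplaceSharpsA sheet) none
                                (some (PySem.Int.mod ((c * 60 + d) - (a * 60 + b)) (PySem.Str.len (pvReplaceSharpsA sheet))))) <;>
                        simp
            | [] => simp at h
            | [_] => simp at h
            | _ :: _ :: _ :: _ => simp at h
        | [] => simp at h
        | [_] => simp at h
        | _ :: _ :: _ :: _ => simp at h
    | [] => simp at h
    | [_] => simp at h
    | [_, _] => simp at h
    | [_, _, _] => simp at h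
    | _ :: _ :: _ :: _ :: _ :: _ => simp at h

-- B's fold body, rewritten through pvRec (on a well-formed record)
lemma stepB_rec (mel : String) (best : Option (Int × String)) (info : String)
    (h : pvRecOK info = true) :
    pvStepB mel best info =
      match pvRec mel info with
      | some (t, title) =>
        match best with
        | none => some (t, title)
        | some b => if b.1 < t then some (t, title) else best
      | none => best := by
  unfold pvStepB pvRec
  rw [h]
  simp only [Bool.true_and]
  cases hin : PySem.Str.isIn mel (pvPlayedPart info).2.2 with
  | false => simp
  | true =>
    cases best with
    | none => simp
    | some b =>
      by_cases hb : b.1 < (pvPlayedPart info).2.1 <;> simp [hb]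

lemma foldA (mel : String) :
    ∀ (infos : List String) (idx : Int) (cands : List (Int × Int × String)),
      (∀ i ∈ infos, pvRecOK i = true) →
      (PySem.List.enumerate infos idx).foldl (pvStepA mel) cands =
        cands ++ pvMatched mel idx infos := by
  intro infos
  induction infos with
  | nil => intro idx cands _; simp [PySem.List.enumerate, pvMatched]
  | cons info rest ih =>
    intro idx cands h
    rw [PySem.List.enumerate_cons, List.foldl_cons,
      stepA_rec mel cands idx info (h info (by simp)), pvMatched]
    cases hr : pvRec mel info with
    | none => simpa using ih (idx + 1) cands (fun i hi => h i (by simp [hi]))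
    | some p =>
      obtain ⟨t, title⟩ := p
      rw [ih (idx + 1) _ (fun i hi => h i (by simp [hi]))]
      simp

lemma foldB (mel : String) :
    ∀ (infos : List String) (best : Option (Int × String)),
      (∀ i ∈ infos, pvRecOK i = true) →
      infos.foldl (pvStepB mel) best = pvBestP best (infos.filterMap (pvRec mel)) := by
  intro infos
  induction infos with
  | nil => intro best _; simp [pvBestP]
  | cons info rest ih =>
    intro best h
    rw [List.foldl_cons, stepB_rec mel best info (h info (by simp)), List.filterMap_cons]
    cases hr : pvRec mel info with
    | none => exact ih best (fun i hi => h i (by simp [hi]))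
    | some p =>
      obtain ⟨t, title⟩ := p
      rw [ih _ (fun i hi => h i (by simp [hi]))]
      cases best with
      | none => simp [pvBestP]
      | some b => by_cases hb : b.1 < t <;> simp [pvBestP, hb]

lemma matched_map (mel : String) :
    ∀ (infos : List String) (idx : Int),
      (pvMatched mel idx infos).map (fun c => (c.1, c.2.2)) =
        infos.filterMap (pvRec mel) := by
  intro infos
  induction infos with
  | nil => intro idx; simp [pvMatched]
  | cons info rest ih =>
    intro idx
    rw [pvMatched, List.filterMap_cons]
    cases hr : pvRec mel info with
    | none => exact ih (idx + 1)
    | some p => obtain ⟨t, title⟩ := p; simp [ih (idx + 1)]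

-- B's fold over the projected pairs is B's fold over the triples
lemma bestP_map (best : Option (Int × String)) (cs : List (Int × Int × String)) :
    pvBestP best (cs.map (fun c => (c.1, c.2.2))) = pvBestT best cs := by
  unfold pvBestP pvBestT
  rw [List.foldl_map]

lemma matched_snd_le (mel : String) :
    ∀ (infos : List String) (idx : Int), ∀ c ∈ pvMatched mel idx infos, c.2.1 ≤ -idx := by
  intro infos
  induction infos with
  | nil => intro idx c hc; simp [pvMatched] at hc
  | cons info rest ih =>
    intro idx c hc
    rw [pvMatched] at hc
    cases hr : pvRec mel info with
    | none =>
      rw [hr] at hc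
      have := ih (idx + 1) c hc
      omega
    | some p =>
      obtain ⟨t, title⟩ := p
      rw [hr] at hc
      rcases List.mem_cons.1 hc with rfl | hc
      · simp
      · have := ih (idx + 1) c hc; omega

lemma matched_pairwise (mel : String) :
    ∀ (infos : List String) (idx : Int),
      (pvMatched mel idx infos).Pairwise (fun a b => b.2.1 < a.2.1) := by
  intro infos
  induction infos with
  | nil => intro idx; simp [pvMatched]
  | cons info rest ih =>
    intro idx
    rw [pvMatched]
    cases hr : pvRec mel info with
    | none => exact ih (idx + 1)
    | some p =>
      obtain ⟨t, title⟩ := p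
      refine List.pairwise_cons.2 ⟨?_, ih (idx + 1)⟩
      intro c hc
      have := matched_snd_le mel rest (idx + 1) c hc
      simp only
      omega

lemma pairwise_mem_cases {α : Type} {R : α → α → Prop} :
    ∀ {l : List α}, l.Pairwise R → ∀ {a b : α}, a ∈ l → b ∈ l → a = b ∨ R a b ∨ R b a := by
  intro l
  induction l with
  | nil => intro _ a b ha; simp at ha
  | cons x xs ih =>
    intro h a b ha hb
    obtain ⟨hx, hxs⟩ := List.pairwise_cons.1 h
    rcases List.mem_cons.1 ha with ha' | ha'
    · rcases List.mem_cons.1 hb with hb' | hb'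
      · exact Or.inl (ha'.trans hb'.symm)
      · exact Or.inr (Or.inl (ha' ▸ hx b hb'))
    · rcases List.mem_cons.1 hb with hb' | hb'
      · exact Or.inr (Or.inr (hb' ▸ hx a ha'))
      · exact ih hxs ha' hb'

lemma insertBy_congr {α : Type} (f g : α → α → Bool) :
    ∀ (ys : List α) (x : α), (∀ b ∈ ys, f x b = g x b) →
      PySem.List.insertBy f x ys = PySem.List.insertBy g x ys := by
  intro ys
  induction ys with
  | nil => intro x _; rfl
  | cons y ys ih =>
    intro x h
    show (if f x y then x :: y :: ys else y :: PySem.List.insertBy f x ys) =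
      (if g x y then x :: y :: ys else y :: PySem.List.insertBy g x ys)
    rw [h y (by simp)]
    by_cases hg : g x y = true
    · simp [hg]
    · simp only [Bool.not_eq_true] at hg
      simp [hg, ih x (fun b hb => h b (by simp [hb]))]

lemma foldl_insertBy_congr {α : Type} (f g : α → α → Bool) (P : α → Prop)
    (hfg : ∀ a b, P a → P b → f a b = g a b) :
    ∀ (l : List α) (acc : List α), (∀ x ∈ acc, P x) → (∀ x ∈ l, P x) →
      l.foldl (fun acc x => PySem.List.insertBy f x acc) acc =
        l.foldl (fun acc x => PySem.List.insertBy g x acc) acc := by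
  intro l
  induction l with
  | nil => intro acc _ _; rfl
  | cons x xs ih =>
    intro acc hacc hl
    rw [List.foldl_cons, List.foldl_cons,
      insertBy_congr f g acc x (fun b hb => hfg x b (hl x (by simp)) (hacc b hb))]
    refine ih _ (fun y hy => ?_) (fun y hy => hl y (by simp [hy]))
    rcases (PySem.List.insertBy_mem_iff g x y acc).1 hy with rfl | hy
    · exact hl y (by simp)
    · exact hacc y hy

-- on a snd-distinct candidate list, A's full tuple comparison is the (play_time, -idx) key order
lemma sortRev_eq_sorted (cs : List (Int × Int × String))
    (h : cs.Pairwise (fun a b => b.2.1 < a.2.1)) :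
    pvSortRev cs = PySem.List.sorted cs pvKey true := by
  show cs.foldl (fun acc x => PySem.List.insertBy (fun a b => pvTupLt b a) x acc) [] =
    PySem.List.sorted cs pvKey true
  have hs : PySem.List.sorted cs pvKey true =
      cs.foldl (fun acc x => PySem.List.insertBy (fun a b => decide (pvKey b < pvKey a)) x acc) [] := rfl
  rw [hs]
  apply foldl_insertBy_congr _ _ (fun x => x ∈ cs) ?_ cs [] (by simp) (fun x hx => hx)
  intro a b ha hb
  rcases pairwise_mem_cases h ha hb with rfl | hlt | hlt
  · simp [pvTupLt, pvKey]
  · have hne : b.2.1 ≠ a.2.1 := by omega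
    simp only [pvTupLt, pvKey, Prod.Lex.toLex_lt_toLex]
    by_cases h1 : b.1 < a.1
    · simp [h1]
    · by_cases h2 : b.1 = a.1 <;> simp [h1, h2, hne]
  · have hne : b.2.1 ≠ a.2.1 := by omega
    simp only [pvTupLt, pvKey, Prod.Lex.toLex_lt_toLex]
    by_cases h1 : b.1 < a.1
    · simp [h1]
    · by_cases h2 : b.1 = a.1 <;> simp [h1, h2, hne]

lemma bestT_const (t : Int) (s : String) :
    ∀ (cs : List (Int × Int × String)), (∀ y ∈ cs, y.1 ≤ t) →
      pvBestT (some (t, s)) cs = some (t, s) := by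
  intro cs
  induction cs with
  | nil => intro _; rfl
  | cons c cs ih =>
    intro h
    have hc : ¬ t < c.1 := by have := h c (by simp); omega
    show pvBestT (if t < c.1 then some (c.1, c.2.2) else some (t, s)) cs = some (t, s)
    rw [if_neg hc]
    exact ih (fun y hy => h y (by simp [hy]))

lemma key_le_fst {y m : Int × Int × String} (h : pvKey y ≤ pvKey m) : y.1 ≤ m.1 := by
  rcases Prod.Lex.toLex_le_toLex.1 h with h1 | ⟨h1, _⟩ <;> omega

lemma bestT_reach (m : Int × Int × String) :
    ∀ (cs : List (Int × Int × String)), cs.Pairwise (fun a b => b.2.1 < a.2.1) →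
      m ∈ cs → (∀ y ∈ cs, pvKey y ≤ pvKey m) →
      ∀ (t : Int) (s : String), t < m.1 →
        pvBestT (some (t, s)) cs = some (m.1, m.2.2) := by
  intro cs
  induction cs with
  | nil => intro _ hm; simp at hm
  | cons c cs ih =>
    intro hpw hm hmax t s ht
    obtain ⟨hc, hcs⟩ := List.pairwise_cons.1 hpw
    rcases List.mem_cons.1 hm with rfl | hm
    · show pvBestT (if t < m.1 then some (m.1, m.2.2) else some (t, s)) cs = some (m.1, m.2.2)
      rw [if_pos ht]
      exact bestT_const m.1 m.2.2 cs
        (fun y hy => key_le_fst (hmax y (by simp [hy])))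
    · have hkey : pvKey c ≤ pvKey m := hmax c (by simp)
      have hfst : c.1 < m.1 := by
        rcases Prod.Lex.toLex_le_toLex.1 hkey with h1 | ⟨h1, h2⟩
        · exact h1
        · have := hc m hm
          omega
      show pvBestT (if t < c.1 then some (c.1, c.2.2) else some (t, s)) cs = some (m.1, m.2.2)
      by_cases htc : t < c.1
      · rw [if_pos htc]
        exact ih hcs hm (fun y hy => hmax y (by simp [hy])) c.1 c.2.2 hfst
      · rw [if_neg htc]
        exact ih hcs hm (fun y hy => hmax y (by simp [hy])) t s ht

lemma bestT_none (c : Int × Int × String) (cs : List (Int × Int × String))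
    (hpw : (c :: cs).Pairwise (fun a b => b.2.1 < a.2.1))
    (m : Int × Int × String) (hm : m ∈ c :: cs)
    (hmax : ∀ y ∈ c :: cs, pvKey y ≤ pvKey m) :
    pvBestT none (c :: cs) = some (m.1, m.2.2) := by
  obtain ⟨hc, hcs⟩ := List.pairwise_cons.1 hpw
  show pvBestT (some (c.1, c.2.2)) cs = some (m.1, m.2.2)
  rcases List.mem_cons.1 hm with rfl | hm
  · exact bestT_const m.1 m.2.2 cs (fun y hy => key_le_fst (hmax y (by simp [hy])))
  · have hkey : pvKey c ≤ pvKey m := hmax c (by simp)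
    have hfst : c.1 < m.1 := by
      rcases Prod.Lex.toLex_le_toLex.1 hkey with h1 | ⟨h1, h2⟩
      · exact h1
      · have := hc m hm
        omega
    exact bestT_reach m cs hcs hm (fun y hy => hmax y (by simp [hy])) c.1 c.2.2 hfst

-- ===== VERDICT (by name: the statement is the Claim_ definition above) =====
theorem solution_spec : Claim_equal_solution := by
  intro m infos _hdom hpre
  unfold Spec_solution
  rw [solution_unfold, solution_alt_unfold]
  have hA : (PySem.List.enumerate infos).foldl (pvStepA (pvReplaceSharpsA m)) [] =
      pvMatched (pvReplaceSharpsA m) 0 infos := by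
    simpa using foldA (pvReplaceSharpsA m) infos 0 [] hpre
  have hB : infos.foldl (pvStepB (pvReplaceSharpsB m)) none =
      pvBestT none (pvMatched (pvReplaceSharpsA m) 0 infos) := by
    rw [foldB (pvReplaceSharpsB m) infos none hpre, ← repl_AB m,
      ← matched_map (pvReplaceSharpsA m) infos 0, bestP_map]
  rw [hA, hB]
  cases hcs : pvMatched (pvReplaceSharpsA m) 0 infos with
  | nil => rfl
  | cons c cs =>
    have hpw : (c :: cs).Pairwise (fun a b => b.2.1 < a.2.1) := by
      rw [← hcs]; exact matched_pairwise (pvReplaceSharpsA m) infos 0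
    have hsort : pvSortRev (c :: cs) = PySem.List.sorted (c :: cs) pvKey true :=
      sortRev_eq_sorted _ hpw
    obtain ⟨hm, ht, hsorted⟩ : ∃ hd tl, PySem.List.sorted (c :: cs) pvKey true = hd :: tl := by
      cases hs : PySem.List.sorted (c :: cs) pvKey true with
      | nil => exact absurd ((PySem.List.sorted_eq_nil_iff _ _ _).1 hs) (by simp)
      | cons hd tl => exact ⟨hd, tl, rfl⟩
    have hmem : hm ∈ c :: cs :=
      (PySem.List.sorted_perm (c :: cs) pvKey true).mem_iff.1
        (by rw [hsorted]; exact List.mem_cons_self)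
    have hmax : ∀ y ∈ c :: cs, pvKey y ≤ pvKey hm :=
      PySem.List.key_head_sorted_rev_ge (c :: cs) pvKey hsorted
    rw [hsort, hsorted, bestT_none c cs hpw hm hmem hmax]
    simp
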